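-- pv_equiv track=rewrite | github.com/seon318/algorithm | 백준/Silver/12761. 돌다리/돌다리.py | bfs
-- ===== SOURCE A (Python) =====
-- from collections import deque
--
-- def bfs(a, b, n, m):
--     q = deque([n])
--     bridge = [0] * 100001
--     bridge[n] = 1
--     while q:
--         x = q.popleft()
--         dx = [1, -1, a, -a, b, -b, (a-1) * x, (b-1) * x]
--         for i in dx:
--             nx = x + i
--             if 0 <= nx < 100001 and not bridge[nx] :
--                 q.append(nx)
--                 bridge[nx] = bridge[x] + 1
--                 if nx == m:
--                     return bridge[m] - 1
-- ===== SOURCE B (Python) =====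
-- def bfs(a, b, n, m):
--     # Bellman-Ford-style relaxation over the whole board: no queue, no frontier;
--     # sweep all cells (alternating direction) until no distance improves, then
--     # read the answer off the distance table.
--     dist = [None] * 100001
--     dist[n] = 0
--     changed = True
--     forward = True
--     while changed:
--         changed = False
--         order = range(100001) if forward else range(100000, -1, -1)
--         for x in order:
--             dx = dist[x]
--             if dx is None:
--                 continue
--             for nx in (x + 1, x - 1, x + a, x - a, x + b, x - b, a * x, b * x):
--                 if 0 <= nx <= 100000 and (dist[nx] is None or dist[nx] > dx + 1):
--                     dist[nx] = dx + 1
--                     changed = True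
--         forward = not forward
--     return dist[m] if 0 <= m <= 100000 else None
-- ===== Notes on version B (the rewrite author's own statement) =====
-- stated objective: alternative
-- what changed: A's queue-driven BFS with early return at first discovery is replaced by Bellman-Ford-style label-correcting relaxation: a distance table over the whole board is swept (alternating direction) until no entry improves, and the answer is read off the converged table.
-- intended difference: When m == n (start equals target) A returns None because the start cell is pre-marked and never rediscovered, while B returns 0, the intended number of moves from a stone to itself. — e.g. on bfs(2, 3, 1, 1): A returns none, B returns some 0
-- outside the precondition, e.g. on bfs(1, 1, -3, 5): A returns None, B returns 99993; on bfs(2, 3, -1, 7): A returns 3, B returns 33331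
import Mathlib
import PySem

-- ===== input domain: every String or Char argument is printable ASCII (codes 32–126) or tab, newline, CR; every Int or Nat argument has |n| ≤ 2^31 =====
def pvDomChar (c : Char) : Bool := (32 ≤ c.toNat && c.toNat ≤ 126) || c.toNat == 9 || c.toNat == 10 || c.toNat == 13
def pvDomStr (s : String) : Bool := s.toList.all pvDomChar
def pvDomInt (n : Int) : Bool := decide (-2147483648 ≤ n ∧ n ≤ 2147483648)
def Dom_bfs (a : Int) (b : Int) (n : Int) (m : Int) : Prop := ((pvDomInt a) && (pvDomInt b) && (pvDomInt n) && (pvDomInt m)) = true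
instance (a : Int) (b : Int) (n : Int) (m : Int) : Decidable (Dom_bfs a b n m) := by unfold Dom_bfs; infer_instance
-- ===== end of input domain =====

set_option maxRecDepth 10000

-- B replaces A's queue-driven BFS (early return at first discovery) by Bellman-Ford-style
-- label-correcting relaxation: full-board sweeps (alternating direction) until no distance
-- improves, then the answer is read off the converged table (objective: alternative).

-- Shared array-access helper: Python indexing arr[i] on a length-100001 list, exact for
-- -100001 ≤ i ≤ 100000 (negative i wraps to i + 100001); outside that Python raises
-- IndexError (inside the loops every index is guard-checked to 0 ≤ nx ≤ 100000).
def pyWrap (i : Int) : Int := if i < 0 then i + 100001 else i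

-- ===== PORT A =====
def agetI (arr : Array Int) (i : Int) : Int := arr.getD (pyWrap i).toNat 0
def asetI (arr : Array Int) (i v : Int) : Array Int := arr.setIfInBounds (pyWrap i).toNat v

-- inner 'for i in dx' loop: threads the queue tail (appends at the end) and the bridge array;
-- .inl = the function returned, .inr = loop finished
def bfsStepA (m x : Int) (dxs : List Int) (q : List Int) (bridge : Array Int) :
    Sum Int (List Int × Array Int) :=
  match dxs with
  | [] => .inr (q, bridge)
  | i :: rest =>
    if 0 ≤ x + i ∧ x + i < 100001 ∧ agetI bridge (x + i) = 0 then
      if x + i = m then .inl (agetI (asetI bridge (x + i) (agetI bridge x + 1)) m - 1)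
      else bfsStepA m x rest (q ++ [x + i]) (asetI bridge (x + i) (agetI bridge x + 1))
    else bfsStepA m x rest q bridge

-- 'while q': pop left, build dx, run the inner loop. fuel only makes the recursion structural;
-- 200003 exceeds any possible number of pops (1 initial + at most 100001 enqueues, one per
-- freshly marked cell), as the proof's fuel bound shows.
def bfsLoopA (a b m : Int) (fuel : Nat) (q : List Int) (bridge : Array Int) : Option Int :=
  match q with
  | [] => none
  | x :: q' =>
    match fuel with
    | 0 => none
    | f + 1 =>
      match bfsStepA m x [1, -1, a, -a, b, -b, (a-1) * x, (b-1) * x] q' bridge with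
      | .inl ans => some ans
      | .inr (q'', bridge') => bfsLoopA a b m f q'' bridge'

def bfs (a : Int) (b : Int) (n : Int) (m : Int) : Option Int :=
  bfsLoopA a b m 200003 [n] (asetI (Array.replicate 100001 0) n 1)

-- ===== PORT B =====
def dgetO (arr : Array (Option Int)) (i : Int) : Option Int := arr.getD (pyWrap i).toNat none
def dsetO (arr : Array (Option Int)) (i : Int) (v : Option Int) : Array (Option Int) :=
  arr.setIfInBounds (pyWrap i).toNat v

-- 'dist[nx] is None or dist[nx] > dx + 1'
def relaxCond (o : Option Int) (dxv : Int) : Bool :=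
  match o with
  | none => true
  | some w => decide (dxv + 1 < w)

-- inner 'for nx in (…)' loop of Source B: relax the eight neighbours of one cell
def relaxStep (dxv : Int) (nxs : List Int) (dist : Array (Option Int)) (changed : Bool) :
    Array (Option Int) × Bool :=
  match nxs with
  | [] => (dist, changed)
  | nx :: rest =>
    if 0 ≤ nx ∧ nx ≤ 100000 ∧ relaxCond (dgetO dist nx) dxv = true then
      relaxStep dxv rest (dsetO dist nx (some (dxv + 1))) true
    else relaxStep dxv rest dist changed

-- 'for x in order'
def sweepCells (a b : Int) (order : List Int) (dist : Array (Option Int)) (changed : Bool) :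
    Array (Option Int) × Bool :=
  match order with
  | [] => (dist, changed)
  | x :: rest =>
    match dgetO dist x with
    | none => sweepCells a b rest dist changed
    | some dxv =>
      match relaxStep dxv [x + 1, x - 1, x + a, x - a, x + b, x - b, a * x, b * x] dist changed with
      | (dist', ch') => sweepCells a b rest dist' ch'

-- 'while changed': one full-board sweep per iteration, alternating direction. fuel only makes
-- the recursion structural; 100003 sweeps always suffice to reach the fixpoint, as the proof's
-- progress lemma shows (the Python loop stops at the first unchanged sweep).
def relaxLoop (a b : Int) (fuel : Nat) (dist : Array (Option Int)) (forward : Bool) :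
    Array (Option Int) :=
  match fuel with
  | 0 => dist
  | f + 1 =>
    match sweepCells a b
        (if forward then PySem.List.pyRange 0 100001 1 else PySem.List.pyRange 100000 (-1) (-1))
        dist false with
    | (dist', ch) => if ch then relaxLoop a b f dist' (!forward) else dist'

def bfs_alt (a : Int) (b : Int) (n : Int) (m : Int) : Option Int :=
  let distF := relaxLoop a b 100003 (dsetO (Array.replicate 100001 none) n (some 0)) true
  if 0 ≤ m ∧ m ≤ 100000 then dgetO distF m else none

-- ===== PRECONDITION & SPEC =====
-- Pre_ restricts to the task's natural domain of on-board start positions 0 ≤ n ≤ 100000: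
-- for -100001 ≤ n < 0 A still returns, but its values come from a search seeded at a negative
-- index whose wraparound marking (blocking cell n + 100001) is an accident of Python list
-- indexing; for n outside [-100001, 100000] both A and B raise IndexError.
def Pre_bfs (a : Int) (b : Int) (n : Int) (m : Int) : Prop := 0 ≤ n ∧ n ≤ 100000
instance (a : Int) (b : Int) (n : Int) (m : Int) : Decidable (Pre_bfs a b n m) := by
  unfold Pre_bfs; infer_instance
def pvWitness_bfs : Int × Int × Int × Int := (2, 3, 1, 10)

-- When m == n (start equals target) A returns None because the start cell is pre-marked and
-- never rediscovered, while B returns 0, the intended number of moves from a stone to itself.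
def D_bfs (a : Int) (b : Int) (n : Int) (m : Int) : Prop := m = n
instance (a : Int) (b : Int) (n : Int) (m : Int) : Decidable (D_bfs a b n m) := by
  unfold D_bfs; infer_instance

def Spec_bfs (a : Int) (b : Int) (n : Int) (m : Int) (out : Option Int) : Prop :=
  ¬ D_bfs a b n m → out = bfs_alt a b n m
instance (a : Int) (b : Int) (n : Int) (m : Int) (out : Option Int) : Decidable (Spec_bfs a b n m out) := by unfold Spec_bfs; infer_instance

def pvDiffWitness_bfs : Int × Int × Int × Int := (2, 3, 1, 1)
def pvDiffWitnessOut_bfs : (Option Int) × (Option Int) := (none, some 0)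

-- ===== CLAIM (what is proved, stated in full; the proofs are below) =====
def Claim_unchanged_bfs : Prop := ∀ (a : Int) (b : Int) (n : Int) (m : Int), Dom_bfs a b n m → Pre_bfs a b n m → Spec_bfs a b n m (bfs a b n m)
def Claim_changed_bfs : Prop := Dom_bfs (pvDiffWitness_bfs.1) (pvDiffWitness_bfs.2.1) (pvDiffWitness_bfs.2.2.1) (pvDiffWitness_bfs.2.2.2) ∧ Pre_bfs (pvDiffWitness_bfs.1) (pvDiffWitness_bfs.2.1) (pvDiffWitness_bfs.2.2.1) (pvDiffWitness_bfs.2.2.2) ∧ D_bfs (pvDiffWitness_bfs.1) (pvDiffWitness_bfs.2.1) (pvDiffWitness_bfs.2.2.1) (pvDiffWitness_bfs.2.2.2) ∧ bfs (pvDiffWitness_bfs.1) (pvDiffWitness_bfs.2.1) (pvDiffWitness_bfs.2.2.1) (pvDiffWitness_bfs.2.2.2) = pvDiffWitnessOut_bfs.1 ∧ bfs_alt (pvDiffWitness_bfs.1) (pvDiffWitness_bfs.2.1) (pvDiffWitness_bfs.2.2.1) (pvDiffWitness_bfs.2.2.2) = pvDiffWitnessOut_bfs.2 ∧ pvDiffWitnessOut_bfs.1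 ≠ pvDiffWitnessOut_bfs.2
def Claim_exact_bfs : Prop := ∀ (a : Int) (b : Int) (n : Int) (m : Int), Dom_bfs a b n m → Pre_bfs a b n m → D_bfs a b n m → bfs a b n m ≠ bfs_alt a b n m

-- ===== LEMMAS AND PROOFS =====

-- =====================================================================================
-- Part 1: an internal wave-BFS form of A's search, and the simulation bfs = waveBfs.
-- (proof-side helpers only; used by no definition the claims mention)
-- =====================================================================================

def agetBo (arr : Array Bool) (i : Int) : Bool := arr.getD (pyWrap i).toNat false
def asetBo (arr : Array Bool) (i : Int) (v : Bool) : Array Bool := arr.setIfInBounds (pyWrap i).toNat v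

def waveStep (m depth : Int) (nxs : List Int) (nxt : List Int) (visited : Array Bool) :
    Sum Int (List Int × Array Bool) :=
  match nxs with
  | [] => .inr (nxt, visited)
  | nx :: rest =>
    if 0 ≤ nx ∧ nx ≤ 100000 ∧ agetBo visited nx = false then
      if nx = m then .inl depth
      else waveStep m depth rest (nxt ++ [nx]) (asetBo visited nx true)
    else waveStep m depth rest nxt visited

def waveInner (a b m depth : Int) (cur : List Int) (nxt : List Int) (visited : Array Bool) :
    Sum Int (List Int × Array Bool) :=
  match cur with
  | [] => .inr (nxt, visited)
  | x :: cs =>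
    match waveStep m depth [x + 1, x - 1, x + a, x - a, x + b, x - b, a * x, b * x] nxt visited with
    | .inl ans => .inl ans
    | .inr (nxt', vis') => waveInner a b m depth cs nxt' vis'

def waveLoop (a b m : Int) (fuel : Nat) (frontier : List Int) (visited : Array Bool) (depth : Int) :
    Option Int :=
  match frontier with
  | [] => none
  | _ :: _ =>
    match fuel with
    | 0 => none
    | f + 1 =>
      match waveInner a b m (depth + 1) frontier [] visited with
      | .inl ans => some ans
      | .inr (nxt, vis') => waveLoop a b m f nxt vis' (depth + 1)

def waveBfs (a : Int) (b : Int) (n : Int) (m : Int) : Option Int :=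
  waveLoop a b m 100003 [n] (asetBo (Array.replicate 100001 false) n true) 0

theorem pyWrap_of_nonneg {i : Int} (h : 0 ≤ i) : pyWrap i = i := by
  unfold pyWrap; omega

-- generic getD-after-setIfInBounds fact used by all three array types
theorem arrGetD_set {α : Type} (arr : Array α) (i j : Nat) (v d : α) (h : i < arr.size) :
    (arr.setIfInBounds i v).getD j d = if j = i then v else arr.getD j d := by
  simp only [Array.getD_eq_getD_getElem?, Array.getElem?_setIfInBounds]
  by_cases hji : j = i
  · subst hji; simp [h]
  · simp [Ne.symm hji, hji]

theorem agetI_asetI (arr : Array Int) (i j v : Int) (hsz : arr.size = 100001)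
    (hi0 : 0 ≤ i) (hi1 : i ≤ 100000) (hj : 0 ≤ pyWrap j) :
    agetI (asetI arr i v) j = if pyWrap j = i then v else agetI arr j := by
  unfold agetI asetI
  rw [pyWrap_of_nonneg hi0, arrGetD_set _ _ _ _ _ (by omega)]
  by_cases h : pyWrap j = i
  · simp [h]
  · rw [if_neg (by omega), if_neg h]

theorem agetBo_asetBo (arr : Array Bool) (i j : Int) (v : Bool) (hsz : arr.size = 100001)
    (hi0 : 0 ≤ i) (hi1 : i ≤ 100000) (hj : 0 ≤ pyWrap j) :
    agetBo (asetBo arr i v) j = if pyWrap j = i then v else agetBo arr j := by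
  unfold agetBo asetBo
  rw [pyWrap_of_nonneg hi0, arrGetD_set _ _ _ _ _ (by omega)]
  by_cases h : pyWrap j = i
  · simp [h]
  · rw [if_neg (by omega), if_neg h]

-- the joint invariant of the two searches: S = the set of marked cells
def BfsInv (bridge : Array Int) (visited : Array Bool) (S : Finset Int) : Prop :=
  bridge.size = 100001 ∧ visited.size = 100001 ∧
  (∀ i ∈ S, 0 ≤ i ∧ i ≤ 100000) ∧
  (∀ i : Int, 0 ≤ i → i ≤ 100000 → (agetI bridge i ≠ 0 ↔ i ∈ S)) ∧
  (∀ i : Int, 0 ≤ i → i ≤ 100000 → (agetBo visited i = true ↔ i ∈ S))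

theorem BfsInv.card_le {bridge visited S} (h : BfsInv bridge visited S) : S.card ≤ 100001 := by
  have hsub : S ⊆ Finset.Icc (0 : Int) 100000 := by
    intro i hi
    have := h.2.2.1 i hi
    simp [Finset.mem_Icc]; omega
  calc S.card ≤ (Finset.Icc (0 : Int) 100000).card := Finset.card_le_card hsub
    _ = 100001 := by simp [Int.card_Icc]


theorem BfsInv.insert {bridge : Array Int} {visited : Array Bool} {S : Finset Int}
    (h : BfsInv bridge visited S) (nx v : Int) (h0 : 0 ≤ nx) (h1 : nx ≤ 100000)
    (hv : v ≠ 0) (hmem : nx ∉ S) :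
    BfsInv (asetI bridge nx v) (asetBo visited nx true) (insert nx S) := by
  obtain ⟨hszA, hszB, hSsub, hA, hB⟩ := h
  refine ⟨by simp [asetI, Array.size_setIfInBounds, hszA],
          by simp [asetBo, Array.size_setIfInBounds, hszB], ?_, ?_, ?_⟩
  · intro i hi
    rcases Finset.mem_insert.mp hi with rfl | hi
    · exact ⟨h0, h1⟩
    · exact hSsub i hi
  · intro i hi0 hi1
    rw [agetI_asetI bridge nx i v hszA h0 h1 (by rw [pyWrap_of_nonneg hi0]; exact hi0),
        pyWrap_of_nonneg hi0]
    by_cases hne : i = nx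
    · subst hne; simp [hv]
    · simp only [Finset.mem_insert, hne, false_or]
      exact hA i hi0 hi1
  · intro i hi0 hi1
    rw [agetBo_asetBo visited nx i true hszB h0 h1 (by rw [pyWrap_of_nonneg hi0]; exact hi0),
        pyWrap_of_nonneg hi0]
    by_cases hne : i = nx
    · subst hne; simp
    · simp only [Finset.mem_insert, hne, false_or]
      exact hB i hi0 hi1

-- simulation of the two inner neighbour loops
theorem step_sim (m d x : Int) : ∀ (dxs nxs : List Int), nxs = dxs.map (x + ·) →
    ∀ (q acc : List Int) (bridge : Array Int) (visited : Array Bool) (S : Finset Int),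
    BfsInv bridge visited S → agetI bridge x = d + 1 → pyWrap x ∈ S → 0 ≤ d →
    (bfsStepA m x dxs q bridge = .inl (d + 1) ∧ waveStep m (d + 1) nxs acc visited = .inl (d + 1))
    ∨ (∃ E S' bridge' visited',
        bfsStepA m x dxs q bridge = .inr (q ++ E, bridge') ∧
        waveStep m (d + 1) nxs acc visited = .inr (acc ++ E, visited') ∧
        BfsInv bridge' visited' S' ∧ S ⊆ S' ∧ S'.card = S.card + E.length ∧
        (∀ j : Int, pyWrap j ∈ S → agetI bridge' j = agetI bridge j) ∧
        (∀ e ∈ E, 0 ≤ e ∧ e ≤ 100000 ∧ e ∈ S' ∧ agetI bridge' e = d + 2)) := by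
  intro dxs
  induction dxs with
  | nil =>
    intro nxs halign q acc bridge visited S hinv hx hxS hd
    subst halign
    right
    exact ⟨[], S, bridge, visited, by simp [bfsStepA], by simp [waveStep], hinv,
      Finset.Subset.refl S, by simp, fun j _ => rfl, by simp⟩
  | cons i rest ih =>
    intro nxs halign q acc bridge visited S hinv hx hxS hd
    subst halign
    obtain ⟨hszA, hszB, hSsub, hA, hB⟩ := hinv
    simp only [List.map_cons, bfsStepA, waveStep]
    by_cases h0 : 0 ≤ x + i
    case neg =>
      rw [if_neg (by tauto), if_neg (by tauto)]
      exact ih _ rfl q acc bridge visited S ⟨hszA, hszB, hSsub, hA, hB⟩ hx hxS hd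
    by_cases h1 : x + i ≤ 100000
    case neg =>
      rw [if_neg (fun hc => absurd hc.2.1 (by omega)), if_neg (fun hc => h1 hc.2.1)]
      exact ih _ rfl q acc bridge visited S ⟨hszA, hszB, hSsub, hA, hB⟩ hx hxS hd
    by_cases hmem : x + i ∈ S
    case pos =>
      -- already visited: both guards fail
      rw [if_neg (fun hc => (hA _ h0 h1).mpr hmem hc.2.2),
          if_neg (fun hc => by have hb := (hB _ h0 h1).mpr hmem; rw [hb] at hc; simp at hc)]
      exact ih _ rfl q acc bridge visited S ⟨hszA, hszB, hSsub, hA, hB⟩ hx hxS hd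
    case neg =>
      have hAg : agetI bridge (x + i) = 0 := by
        by_contra hne; exact hmem ((hA _ h0 h1).mp hne)
      have hBg : agetBo visited (x + i) = false := by
        cases hvb : agetBo visited (x + i)
        · rfl
        · exact absurd ((hB _ h0 h1).mp hvb) hmem
      have hgA : 0 ≤ x + i ∧ x + i < 100001 ∧ agetI bridge (x + i) = 0 := ⟨h0, by omega, hAg⟩
      have hgB : 0 ≤ x + i ∧ x + i ≤ 100000 ∧ agetBo visited (x + i) = false := ⟨h0, h1, hBg⟩
      rw [if_pos hgA, if_pos hgB]
      have hwx0 : 0 ≤ pyWrap x := (hSsub _ hxS).1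
      have hwxne : pyWrap x ≠ x + i := fun he => hmem (he ▸ hxS)
      by_cases heq : x + i = m
      · rw [if_pos heq, if_pos heq]
        left
        constructor
        · have : agetI (asetI bridge (x + i) (agetI bridge x + 1)) m = d + 2 := by
            rw [← heq, agetI_asetI bridge (x + i) (x + i) _ hszA h0 h1
                (by rw [pyWrap_of_nonneg h0]; exact h0), pyWrap_of_nonneg h0, if_pos rfl, hx]
            ring
          rw [this]
          congr 1
          omega
        · rfl
      · rw [if_neg heq, if_neg heq]
        -- recurse with the freshly marked cell
        have hinv2 : BfsInv (asetI bridge (x + i) (agetI bridge x + 1))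
            (asetBo visited (x + i) true) (insert (x + i) S) :=
          BfsInv.insert ⟨hszA, hszB, hSsub, hA, hB⟩ (x + i) _ h0 h1 (by rw [hx]; omega) hmem
        have hx2 : agetI (asetI bridge (x + i) (agetI bridge x + 1)) x = d + 1 := by
          rw [agetI_asetI bridge (x + i) x _ hszA h0 h1 hwx0, if_neg hwxne, hx]
        have hxS2 : pyWrap x ∈ insert (x + i) S := Finset.mem_insert_of_mem hxS
        rcases ih _ rfl (q ++ [x + i]) (acc ++ [x + i]) _ _ _ hinv2 hx2 hxS2 hd with
          ⟨e1, e2⟩ | ⟨E, S', bridge', visited', e1, e2, einv, esub, ecard, epres, eE⟩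
        · left; exact ⟨e1, e2⟩
        · right
          refine ⟨(x + i) :: E, S', bridge', visited', by rw [e1]; simp, by rw [e2]; simp, einv,
            (Finset.subset_insert _ _).trans esub, ?_, ?_, ?_⟩
          · rw [ecard, Finset.card_insert_of_notMem hmem, List.length_cons]; ring
          · intro j hj
            rw [epres j (Finset.mem_insert_of_mem hj),
                agetI_asetI bridge (x + i) j _ hszA h0 h1 (hSsub _ hj).1,
                if_neg (fun he => hmem (by rwa [he] at hj))]
          · intro e he
            rcases List.mem_cons.mp he with rfl | he
            · refine ⟨h0, h1, esub (Finset.mem_insert_self _ _), ?_⟩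
              rw [epres (x + i) (by rw [pyWrap_of_nonneg h0]; exact Finset.mem_insert_self _ _),
                  agetI_asetI bridge (x + i) (x + i) _ hszA h0 h1
                    (by rw [pyWrap_of_nonneg h0]; exact h0),
                  pyWrap_of_nonneg h0, if_pos rfl, hx]
              ring
            · exact eE e he

-- simulation of the outer loops: A's queue is the current frontier remainder ++ next frontier
theorem main_sim (a b m : Int) : ∀ (fB fA : Nat) (cur nxt : List Int) (bridge : Array Int)
    (visited : Array Bool) (S : Finset Int) (d : Int),
    BfsInv bridge visited S → 0 ≤ d →
    (∀ y ∈ cur, pyWrap y ∈ S ∧ agetI bridge y = d + 1) →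
    (∀ y ∈ nxt, pyWrap y ∈ S ∧ agetI bridge y = d + 2) →
    cur.length + nxt.length + (100001 - S.card) ≤ fA →
    (100001 - S.card) + 1 + nxt.length ≤ fB →
    bfsLoopA a b m fA (cur ++ nxt) bridge =
      (match waveInner a b m (d + 1) cur nxt visited with
       | .inl ans => some ans
       | .inr (F, V) => waveLoop a b m fB F V (d + 1)) := by
  intro fB
  induction fB with
  | zero =>
    intro fA cur nxt bridge visited S d hinv hd hcur hnxt hfA hfB
    exact absurd hfB (by have := hinv.card_le; omega)
  | succ fB ihB =>
    intro fA
    induction fA with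
    | zero =>
      intro cur nxt bridge visited S d hinv hd hcur hnxt hfA hfB
      have hc := hinv.card_le
      have hcur0 : cur = [] := List.eq_nil_of_length_eq_zero (by omega)
      have hnxt0 : nxt = [] := List.eq_nil_of_length_eq_zero (by omega)
      subst hcur0; subst hnxt0
      simp [bfsLoopA, waveInner, waveLoop]
    | succ fA ihA =>
      intro cur nxt bridge visited S d hinv hd hcur hnxt hfA hfB
      cases cur with
      | nil =>
        simp only [List.nil_append, waveInner]
        cases nxt with
        | nil => simp [bfsLoopA, waveLoop]
        | cons y ys =>
          have key := ihB (fA + 1) (y :: ys) [] bridge visited S (d + 1) hinv (by omega)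
            (fun z hz => ⟨(hnxt z hz).1, by rw [(hnxt z hz).2]; ring⟩) (by simp)
            (by simp at hfA ⊢; omega) (by simp at hfB ⊢; omega)
          rw [List.append_nil] at key
          rw [key]
          rfl
      | cons x cs =>
        have hxh := hcur x (List.mem_cons_self)
        have align : [x + 1, x - 1, x + a, x - a, x + b, x - b, a * x, b * x] =
            List.map (fun i => x + i) [1, -1, a, -a, b, -b, (a-1) * x, (b-1) * x] := by
          simp only [List.map_cons, List.map_nil, List.cons.injEq, and_true]
          exact ⟨trivial, by ring, trivial, by ring, trivial, by ring, by ring, by ring⟩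
        rcases step_sim m d x [1, -1, a, -a, b, -b, (a-1) * x, (b-1) * x]
            [x + 1, x - 1, x + a, x - a, x + b, x - b, a * x, b * x] align
            (cs ++ nxt) nxt bridge visited S hinv hxh.2 hxh.1 hd with
          ⟨e1, e2⟩ | ⟨E, S', br', vis', e1, e2, einv, esub, ecard, epres, eE⟩
        · simp only [List.cons_append, bfsLoopA, waveInner]
          rw [e1, e2]
        · simp only [List.cons_append, bfsLoopA, waveInner]
          rw [e1, e2, List.append_assoc]
          have hcur' : ∀ y ∈ cs, pyWrap y ∈ S' ∧ agetI br' y = d + 1 := by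
            intro y hy
            have h := hcur y (List.mem_cons_of_mem _ hy)
            exact ⟨esub h.1, by rw [epres y h.1]; exact h.2⟩
          have hnxt' : ∀ y ∈ nxt ++ E, pyWrap y ∈ S' ∧ agetI br' y = d + 2 := by
            intro y hy
            rcases List.mem_append.mp hy with hy | hy
            · have h := hnxt y hy
              exact ⟨esub h.1, by rw [epres y h.1]; exact h.2⟩
            · have h := eE y hy
              exact ⟨by rw [pyWrap_of_nonneg h.1]; exact h.2.2.1, h.2.2.2⟩
          have hcard' := einv.card_le
          exact ihA cs (nxt ++ E) br' vis' S' d einv hd hcur' hnxt'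
            (by simp at hfA ⊢; omega) (by simp at hfB ⊢; omega)

theorem bfs_eq_wave (a b n m : Int) (hn0 : 0 ≤ n) (hn1 : n ≤ 100000) :
    bfs a b n m = waveBfs a b n m := by
  have hw0 : 0 ≤ pyWrap n := by unfold pyWrap; split <;> omega
  have hw1 : pyWrap n ≤ 100000 := by unfold pyWrap; split <;> omega
  unfold bfs waveBfs
  set br0 := asetI (Array.replicate 100001 0) n 1 with hbr0
  set vis0 := asetBo (Array.replicate 100001 false) n true with hvis0
  have hrepI : ∀ j : Int, agetI (Array.replicate 100001 (0 : Int)) j = 0 := by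
    intro j; unfold agetI Array.getD; split <;> simp
  have hrepB : ∀ j : Int, agetBo (Array.replicate 100001 false) j = false := by
    intro j; unfold agetBo Array.getD; split <;> simp
  have hbrw : br0 = asetI (Array.replicate 100001 0) (pyWrap n) 1 := by
    rw [hbr0]; unfold asetI; rw [pyWrap_of_nonneg hw0]
  have hvisw : vis0 = asetBo (Array.replicate 100001 false) (pyWrap n) true := by
    rw [hvis0]; unfold asetBo; rw [pyWrap_of_nonneg hw0]
  have hgetbr : ∀ j : Int, 0 ≤ pyWrap j →
      agetI br0 j = if pyWrap j = pyWrap n then 1 else 0 := by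
    intro j hj
    rw [hbrw, agetI_asetI _ _ _ _ (by simp) hw0 hw1 hj]
    split
    · rfl
    · exact hrepI j
  have hgetvis : ∀ j : Int, 0 ≤ pyWrap j →
      agetBo vis0 j = if pyWrap j = pyWrap n then true else false := by
    intro j hj
    rw [hvisw, agetBo_asetBo _ _ _ _ (by simp) hw0 hw1 hj]
    split
    · rfl
    · exact hrepB j
  have inv0 : BfsInv br0 vis0 {pyWrap n} := by
    refine ⟨by rw [hbrw]; simp [asetI], by rw [hvisw]; simp [asetBo], ?_, ?_, ?_⟩
    · intro i hi; rw [Finset.mem_singleton] at hi; subst hi; exact ⟨hw0, hw1⟩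
    · intro i hi0 hi1
      rw [hgetbr i (by rw [pyWrap_of_nonneg hi0]; exact hi0), pyWrap_of_nonneg hi0,
        Finset.mem_singleton]
      by_cases hi : i = pyWrap n
      · simp [hi]
      · simp [hi]
    · intro i hi0 hi1
      rw [hgetvis i (by rw [pyWrap_of_nonneg hi0]; exact hi0), pyWrap_of_nonneg hi0,
        Finset.mem_singleton]
      by_cases hi : i = pyWrap n
      · simp [hi]
      · simp [hi]
  have hcard : ({pyWrap n} : Finset Int).card = 1 := Finset.card_singleton _
  have key := main_sim a b m 100002 200003 [n] [] br0 vis0 {pyWrap n} 0 inv0 le_rfl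
    (fun y hy => by
      rw [List.mem_singleton] at hy; subst hy
      refine ⟨Finset.mem_singleton_self _, ?_⟩
      rw [hgetbr _ hw0, if_pos rfl]; norm_num)
    (by simp)
    (by rw [hcard]; norm_num)
    (by rw [hcard]; norm_num)
  rw [List.append_nil] at key
  rw [key]
  rfl

-- =====================================================================================
-- Part 2: the BFS level sets of the board graph (proof-side specification).
-- =====================================================================================

def boardB : Finset Int := (Finset.range 100001).image (fun i : Nat => (i : Int))

theorem mem_boardB {v : Int} : v ∈ boardB ↔ 0 ≤ v ∧ v ≤ 100000 := by
  unfold boardB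
  simp only [Finset.mem_image, Finset.mem_range]
  constructor
  · rintro ⟨i, hi, rfl⟩; constructor <;> [positivity; exact_mod_cast by omega]
  · rintro ⟨h0, h1⟩
    refine ⟨v.toNat, by omega, by omega⟩

theorem boardB_card : boardB.card = 100001 := by
  unfold boardB
  rw [Finset.card_image_of_injective _ (fun x y h => by exact_mod_cast h), Finset.card_range]
def nbrsL (a b x : Int) : List Int := [x + 1, x - 1, x + a, x - a, x + b, x - b, a * x, b * x]

def frvis (a b n : Int) : Nat → Finset Int × Finset Int
  | 0 => ({n}, {n})
  | d + 1 =>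
    let p := frvis a b n d
    let F' := boardB.filter (fun v => v ∉ p.2 ∧ ∃ u ∈ p.1, v ∈ nbrsL a b u)
    (F', p.2 ∪ F')

def Fr (a b n : Int) (d : Nat) : Finset Int := (frvis a b n d).1
def Vis (a b n : Int) (d : Nat) : Finset Int := (frvis a b n d).2

theorem Fr_zero (a b n : Int) : Fr a b n 0 = {n} := rfl
theorem Vis_zero (a b n : Int) : Vis a b n 0 = {n} := rfl
theorem Fr_succ (a b n : Int) (d : Nat) :
    Fr a b n (d + 1) =
      boardB.filter (fun v => v ∉ Vis a b n d ∧ ∃ u ∈ Fr a b n d, v ∈ nbrsL a b u) := rfl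
theorem Vis_succ (a b n : Int) (d : Nat) :
    Vis a b n (d + 1) = Vis a b n d ∪ Fr a b n (d + 1) := rfl

theorem Vis_mono (a b n : Int) {d e : Nat} (h : d ≤ e) : Vis a b n d ⊆ Vis a b n e := by
  induction e with
  | zero => simp [Nat.le_zero.mp h]
  | succ e ih =>
    rcases Nat.lt_or_ge d (e + 1) with hlt | hge
    · intro v hv
      rw [Vis_succ]
      exact Finset.mem_union_left _ (ih (by omega) hv)
    · have : d = e + 1 := by omega
      subst this; exact Finset.Subset.refl _

theorem Fr_subset_Vis (a b n : Int) (d : Nat) : Fr a b n d ⊆ Vis a b n d := by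
  cases d with
  | zero => exact Finset.Subset.refl _
  | succ d => rw [Vis_succ]; exact Finset.subset_union_right

theorem mem_Vis_iff (a b n : Int) (d : Nat) (v : Int) :
    v ∈ Vis a b n d ↔ ∃ j, j ≤ d ∧ v ∈ Fr a b n j := by
  induction d with
  | zero =>
    constructor
    · intro h; exact ⟨0, le_rfl, h⟩
    · rintro ⟨j, hj, hv⟩
      have : j = 0 := Nat.le_zero.mp hj
      subst this; exact hv
  | succ d ih =>
    rw [Vis_succ, Finset.mem_union, ih]
    constructor
    · rintro (⟨j, hj, hv⟩ | hv)
      · exact ⟨j, by omega, hv⟩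
      · exact ⟨d + 1, le_rfl, hv⟩
    · rintro ⟨j, hj, hv⟩
      rcases Nat.lt_or_ge j (d + 1) with hlt | hge
      · exact Or.inl ⟨j, by omega, hv⟩
      · have : j = d + 1 := by omega
        subst this; exact Or.inr hv

theorem Fr_succ_notMem_Vis (a b n : Int) (d : Nat) {v : Int} (h : v ∈ Fr a b n (d + 1)) :
    v ∉ Vis a b n d := by
  rw [Fr_succ] at h
  exact (Finset.mem_filter.mp h).2.1

theorem level_unique (a b n : Int) {j k : Nat} {v : Int}
    (hj : v ∈ Fr a b n j) (hk : v ∈ Fr a b n k) : j = k := by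
  by_contra hne
  rcases Nat.lt_or_ge j k with hlt | hge
  · obtain ⟨k', rfl⟩ : ∃ k', k = k' + 1 := ⟨k - 1, by omega⟩
    exact Fr_succ_notMem_Vis a b n k' hk
      (Vis_mono a b n (by omega) (Fr_subset_Vis a b n j hj))
  · have hlt : k < j := by omega
    obtain ⟨j', rfl⟩ : ∃ j', j = j' + 1 := ⟨j - 1, by omega⟩
    exact Fr_succ_notMem_Vis a b n j' hj
      (Vis_mono a b n (by omega) (Fr_subset_Vis a b n k hk))

theorem Fr_subset_board (a b n : Int) (hn : n ∈ boardB) (d : Nat) : Fr a b n d ⊆ boardB := by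
  cases d with
  | zero => rw [Fr_zero]; intro v hv; rw [Finset.mem_singleton] at hv; subst hv; exact hn
  | succ d => rw [Fr_succ]; exact Finset.filter_subset _ _

theorem Vis_subset_board (a b n : Int) (hn : n ∈ boardB) (d : Nat) : Vis a b n d ⊆ boardB := by
  intro v hv
  rcases (mem_Vis_iff a b n d v).mp hv with ⟨j, _, hj⟩
  exact Fr_subset_board a b n hn j hj

theorem nbr_step (a b n : Int) {j : Nat} {u v : Int} (hu : u ∈ Fr a b n j)
    (hv : v ∈ nbrsL a b u) (hb : v ∈ boardB) : v ∈ Vis a b n (j + 1) := by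
  by_cases hvis : v ∈ Vis a b n j
  · exact Vis_mono a b n (by omega) hvis
  · rw [Vis_succ]
    exact Finset.mem_union_right _
      (by rw [Fr_succ]; exact Finset.mem_filter.mpr ⟨hb, hvis, u, hu, hv⟩)

theorem nbr_Vis (a b n : Int) {j : Nat} {u v : Int} (hu : u ∈ Vis a b n j)
    (hv : v ∈ nbrsL a b u) (hb : v ∈ boardB) : v ∈ Vis a b n (j + 1) := by
  rcases (mem_Vis_iff a b n j u).mp hu with ⟨j', hj', hu'⟩
  exact Vis_mono a b n (by omega) (nbr_step a b n hu' hv hb)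

theorem Fr_empty_succ (a b n : Int) {d : Nat} (h : Fr a b n d = ∅) : Fr a b n (d + 1) = ∅ := by
  rw [Fr_succ]
  apply Finset.filter_false_of_mem
  rintro v - ⟨-, u, hu, -⟩
  rw [h] at hu
  exact absurd hu (Finset.notMem_empty u)

theorem Fr_empty_mono (a b n : Int) {d e : Nat} (h : Fr a b n d = ∅) (hde : d ≤ e) :
    Fr a b n e = ∅ := by
  induction e with
  | zero => have : d = 0 := by omega
            subst this; exact h
  | succ e ih =>
    rcases Nat.lt_or_ge d (e + 1) with hlt | hge
    · exact Fr_empty_succ a b n (ih (by omega))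
    · have : d = e + 1 := by omega
      subst this; exact h

theorem Fr_nonempty_card (a b n : Int) (d : Nat) (h : Fr a b n d ≠ ∅) :
    d + 1 ≤ (Vis a b n d).card := by
  induction d with
  | zero => rw [Vis_zero]; simp
  | succ d ih =>
    have hd : Fr a b n d ≠ ∅ := fun he => h (Fr_empty_succ a b n he)
    have hdisj : Disjoint (Vis a b n d) (Fr a b n (d + 1)) := by
      rw [Finset.disjoint_right]
      intro v hv
      exact Fr_succ_notMem_Vis a b n d hv
    have hpos : 1 ≤ (Fr a b n (d + 1)).card := Finset.card_pos.mpr (Finset.nonempty_of_ne_empty h)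
    rw [Vis_succ, Finset.card_union_of_disjoint hdisj]
    have := ih hd
    omega

theorem Vis_card_le (a b n : Int) (hn : n ∈ boardB) (d : Nat) : (Vis a b n d).card ≤ 100001 := by
  calc (Vis a b n d).card ≤ boardB.card := Finset.card_le_card (Vis_subset_board a b n hn d)
    _ = 100001 := boardB_card

theorem level_bound (a b n : Int) (hn : n ∈ boardB) (d : Nat) (h : Fr a b n d ≠ ∅) :
    d ≤ 100000 := by
  have h1 := Fr_nonempty_card a b n d h
  have h2 := Vis_card_le a b n hn d
  omega

-- =====================================================================================
-- Part 3: the wave BFS returns the level of m (level-set characterization).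
-- =====================================================================================

def VInv (visited : Array Bool) (S : Finset Int) : Prop :=
  visited.size = 100001 ∧ (∀ i ∈ S, 0 ≤ i ∧ i ≤ 100000) ∧
  (∀ i : Int, 0 ≤ i → i ≤ 100000 → (agetBo visited i = true ↔ i ∈ S))

theorem VInv.insert {visited : Array Bool} {S : Finset Int} (h : VInv visited S)
    (nx : Int) (h0 : 0 ≤ nx) (h1 : nx ≤ 100000) (hmem : nx ∉ S) :
    VInv (asetBo visited nx true) (insert nx S) := by
  obtain ⟨hsz, hsub, hchar⟩ := h
  refine ⟨by simp [asetBo, Array.size_setIfInBounds, hsz], ?_, ?_⟩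
  · intro i hi
    rcases Finset.mem_insert.mp hi with rfl | hi
    · exact ⟨h0, h1⟩
    · exact hsub i hi
  · intro i hi0 hi1
    rw [agetBo_asetBo visited nx i true hsz h0 h1 (by rw [pyWrap_of_nonneg hi0]; exact hi0),
        pyWrap_of_nonneg hi0]
    by_cases hne : i = nx
    · subst hne; simp
    · simp only [Finset.mem_insert, hne, false_or]
      exact hchar i hi0 hi1

theorem stepW_spec (m dep : Int) :
    ∀ (nxs acc : List Int) (visited : Array Bool) (S : Finset Int), VInv visited S →
    (waveStep m dep nxs acc visited = .inl dep ∧ m ∈ nxs ∧ m ∈ boardB ∧ m ∉ S)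
  ∨ (∃ (E : List Int) (visited' : Array Bool),
      waveStep m dep nxs acc visited = .inr (acc ++ E, visited') ∧
      VInv visited' (S ∪ E.toFinset) ∧
      (∀ v : Int, v ∈ E ↔ (v ∈ nxs ∧ v ∈ boardB ∧ v ∉ S ∧ v ≠ m)) ∧
      ¬(m ∈ nxs ∧ m ∈ boardB ∧ m ∉ S)) := by
  intro nxs
  induction nxs with
  | nil =>
    intro acc visited S hinv
    right
    refine ⟨[], visited, by simp [waveStep], by simpa using hinv, ?_, ?_⟩
    · intro v; simp
    · simp
  | cons nx rest ih =>
    intro acc visited S hinv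
    obtain ⟨hsz, hsub, hchar⟩ := hinv
    simp only [waveStep]
    by_cases hfresh : nx ∈ boardB ∧ nx ∉ S
    · have h0 : 0 ≤ nx := (mem_boardB.mp hfresh.1).1
      have h1 : nx ≤ 100000 := (mem_boardB.mp hfresh.1).2
      have hvb : agetBo visited nx = false := by
        cases hv : agetBo visited nx
        · rfl
        · exact absurd ((hchar nx h0 h1).mp hv) hfresh.2
      rw [if_pos ⟨h0, h1, hvb⟩]
      by_cases heq : nx = m
      · rw [if_pos heq]
        left
        exact ⟨rfl, heq ▸ List.mem_cons_self, heq ▸ hfresh.1, heq ▸ hfresh.2⟩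
      · rw [if_neg heq]
        have hinv2 : VInv (asetBo visited nx true) (insert nx S) :=
          VInv.insert ⟨hsz, hsub, hchar⟩ nx h0 h1 hfresh.2
        rcases ih (acc ++ [nx]) _ (insert nx S) hinv2 with
          ⟨e1, e2, e3, e4⟩ | ⟨E, vis', e1, e2, e3, e4⟩
        · left
          exact ⟨e1, List.mem_cons_of_mem _ e2, e3, fun hm => e4 (Finset.mem_insert_of_mem hm)⟩
        · right
          refine ⟨nx :: E, vis', by rw [e1, List.append_assoc]; rfl, ?_, ?_, ?_⟩
          · have hS : S ∪ (nx :: E).toFinset = insert nx S ∪ E.toFinset := by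
              rw [List.toFinset_cons, Finset.union_insert, ← Finset.insert_union]
            rw [hS]; exact e2
          · intro v
            by_cases hv : v = nx
            · subst hv
              constructor
              · intro _
                exact ⟨List.mem_cons_self, hfresh.1, hfresh.2, heq⟩
              · intro _
                exact List.mem_cons_self
            · have := e3 v
              simp only [List.mem_cons, hv, false_or] at this ⊢
              rw [this]
              constructor
              · rintro ⟨hr, hb, hs, hm⟩
                exact ⟨hr, hb, fun h => hs (Finset.mem_insert_of_mem h), hm⟩
              · rintro ⟨hr, hb, hs, hm⟩
                exact ⟨hr, hb, by simp [Finset.mem_insert, hv, hs], hm⟩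
          · rintro ⟨hm1, hm2, hm3⟩
            rcases List.mem_cons.mp hm1 with rfl | hm1
            · exact heq rfl
            · exact e4 ⟨hm1, hm2, fun h => by
                rcases Finset.mem_insert.mp h with rfl | h
                · exact heq rfl
                · exact hm3 h⟩
    · have hguard : ¬(0 ≤ nx ∧ nx ≤ 100000 ∧ agetBo visited nx = false) := by
        rintro ⟨g0, g1, g2⟩
        refine hfresh ⟨mem_boardB.mpr ⟨g0, g1⟩, fun hs => ?_⟩
        rw [(hchar nx g0 g1).mpr hs] at g2
        exact absurd g2 (by decide)
      rw [if_neg hguard]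
      rcases ih acc visited S ⟨hsz, hsub, hchar⟩ with
        ⟨e1, e2, e3, e4⟩ | ⟨E, vis', e1, e2, e3, e4⟩
      · left
        exact ⟨e1, List.mem_cons_of_mem _ e2, e3, e4⟩
      · right
        refine ⟨E, vis', e1, e2, ?_, ?_⟩
        · intro v
          rw [e3 v]
          constructor
          · rintro ⟨hr, hb, hs, hm⟩
            exact ⟨List.mem_cons_of_mem _ hr, hb, hs, hm⟩
          · rintro ⟨hr, hb, hs, hm⟩
            rcases List.mem_cons.mp hr with rfl | hr
            · exact absurd ⟨hb, hs⟩ hfresh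
            · exact ⟨hr, hb, hs, hm⟩
        · rintro ⟨hm1, hm2, hm3⟩
          rcases List.mem_cons.mp hm1 with rfl | hm1
          · exact hfresh ⟨hm2, hm3⟩
          · exact e4 ⟨hm1, hm2, hm3⟩

theorem innerW_spec (a b m dep : Int) :
    ∀ (cur acc : List Int) (visited : Array Bool) (S : Finset Int), VInv visited S →
    (waveInner a b m dep cur acc visited = .inl dep ∧
      (∃ x ∈ cur, m ∈ nbrsL a b x) ∧ m ∈ boardB ∧ m ∉ S)
  ∨ (∃ (E : List Int) (visited' : Array Bool),
      waveInner a b m dep cur acc visited = .inr (acc ++ E, visited') ∧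
      VInv visited' (S ∪ E.toFinset) ∧
      (∀ v : Int, v ∈ E ↔ ((∃ x ∈ cur, v ∈ nbrsL a b x) ∧ v ∈ boardB ∧ v ∉ S ∧ v ≠ m)) ∧
      ¬((∃ x ∈ cur, m ∈ nbrsL a b x) ∧ m ∈ boardB ∧ m ∉ S)) := by
  intro cur
  induction cur with
  | nil =>
    intro acc visited S hinv
    right
    refine ⟨[], visited, by simp [waveInner], by simpa using hinv, ?_, ?_⟩
    · intro v; simp
    · simp
  | cons x cs ih =>
    intro acc visited S hinv
    simp only [waveInner]
    rcases stepW_spec m dep [x + 1, x - 1, x + a, x - a, x + b, x - b, a * x, b * x]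
        acc visited S hinv with ⟨e1, e2, e3, e4⟩ | ⟨E1, vis1, e1, e2, e3, e4⟩
    · rw [e1]
      left
      exact ⟨rfl, ⟨x, List.mem_cons_self, e2⟩, e3, e4⟩
    · rw [e1]
      rcases ih (acc ++ E1) vis1 (S ∪ E1.toFinset) e2 with
        ⟨f1, ⟨x', hx', hnb⟩, f3, f4⟩ | ⟨E2, vis2, f1, f2, f3, f4⟩
      · left
        refine ⟨f1, ⟨x', List.mem_cons_of_mem x hx', hnb⟩, f3, fun hmS => ?_⟩
        exact f4 (Finset.mem_union_left _ hmS)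
      · right
        refine ⟨E1 ++ E2, vis2,
          by show waveInner a b m dep cs (acc ++ E1) vis1 = _; rw [f1, List.append_assoc], ?_, ?_, ?_⟩
        · have hS : S ∪ (E1 ++ E2).toFinset = (S ∪ E1.toFinset) ∪ E2.toFinset := by
            rw [List.toFinset_append, Finset.union_assoc]
          rw [hS]; exact f2
        · intro v
          rw [List.mem_append]
          constructor
          · rintro (hv | hv)
            · obtain ⟨hr, hb, hs, hm⟩ := (e3 v).mp hv
              exact ⟨⟨x, List.mem_cons_self, hr⟩, hb, hs, hm⟩
            · obtain ⟨⟨x', hx', hnb⟩, hb, hs, hm⟩ := (f3 v).mp hv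
              exact ⟨⟨x', List.mem_cons_of_mem x hx', hnb⟩, hb,
                fun h => hs (Finset.mem_union_left _ h), hm⟩
          · rintro ⟨⟨x', hx', hnb⟩, hb, hs, hm⟩
            by_cases hv1 : v ∈ E1
            · exact Or.inl hv1
            · right
              rcases List.mem_cons.mp hx' with rfl | hx'
              · exact absurd ((e3 v).mpr ⟨hnb, hb, hs, hm⟩) hv1
              · refine (f3 v).mpr ⟨⟨x', hx', hnb⟩, hb, fun h => ?_, hm⟩
                rcases Finset.mem_union.mp h with h | h
                · exact hs h
                · exact hv1 (List.mem_toFinset.mp h)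
        · rintro ⟨⟨x', hx', hnb⟩, hb, hs⟩
          rcases List.mem_cons.mp hx' with rfl | hx'
          · exact e4 ⟨hnb, hb, hs⟩
          · refine f4 ⟨⟨x', hx', hnb⟩, hb, fun h => ?_⟩
            rcases Finset.mem_union.mp h with h | h
            · exact hs h
            · obtain ⟨-, -, -, hm⟩ := (e3 m).mp (List.mem_toFinset.mp h)
              exact hm rfl

-- if m sits at level J ≥ 1, the wave loop started below level J returns J
theorem loopW_found (a b n m : Int) (hn : n ∈ boardB) (J : Nat) (hmJ : m ∈ Fr a b n J) :
    ∀ (fuel : Nat), ∀ (d : Nat) (frontier : List Int) (visited : Array Bool),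
    d < J → VInv visited (Vis a b n d) → frontier.toFinset = Fr a b n d →
    100002 ≤ fuel + d →
    waveLoop a b m fuel frontier visited (d : Int) = some ((J : Int)) := by
  intro fuel
  induction fuel with
  | zero =>
    intro d frontier visited hd hinv hfr hfuel
    have hFrd : Fr a b n d ≠ ∅ := by
      intro he
      rw [Fr_empty_mono a b n he (by omega)] at hmJ
      exact absurd hmJ (Finset.notMem_empty m)
    have := level_bound a b n hn d hFrd
    omega
  | succ f ih =>
    intro d frontier visited hd hinv hfr hfuel
    have hFrd : Fr a b n d ≠ ∅ := by
      intro he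
      rw [Fr_empty_mono a b n he (by omega)] at hmJ
      exact absurd hmJ (Finset.notMem_empty m)
    cases frontier with
    | nil => exact absurd (by simpa using hfr.symm) hFrd
    | cons x cs =>
      simp only [waveLoop]
      rcases innerW_spec a b m ((d : Int) + 1) (x :: cs) [] visited (Vis a b n d) hinv with
        ⟨e1, ⟨x', hx', hnb⟩, hbd, hns⟩ | ⟨E, vis', e1, e2, e3, e4⟩
      · rw [e1]
        have hxF : x' ∈ Fr a b n d := by
          rw [← hfr]; exact List.mem_toFinset.mpr hx'
        have hmV : m ∈ Vis a b n (d + 1) := nbr_step a b n hxF hnb hbd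
        have hmF : m ∈ Fr a b n (d + 1) := by
          rcases Finset.mem_union.mp ((Vis_succ a b n d) ▸ hmV) with h | h
          · exact absurd h hns
          · exact h
        have : J = d + 1 := level_unique a b n hmJ hmF
        subst this
        push_cast
        rfl
      · rw [e1]
        have hmnF : m ∉ Fr a b n (d + 1) := by
          intro hmF
          rw [Fr_succ] at hmF
          obtain ⟨hb, hnv, u, hu, hnb⟩ := Finset.mem_filter.mp hmF
          exact e4 ⟨⟨u, by rw [← hfr] at hu; exact List.mem_toFinset.mp hu, hnb⟩, hb, hnv⟩
        have hEF : E.toFinset = Fr a b n (d + 1) := by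
          ext v
          rw [List.mem_toFinset, e3 v, Fr_succ, Finset.mem_filter]
          constructor
          · rintro ⟨⟨x'', hx'', hnb⟩, hb, hs, hm⟩
            exact ⟨hb, hs, x'', by rw [← hfr]; exact List.mem_toFinset.mpr hx'', hnb⟩
          · rintro ⟨hb, hs, u, hu, hnb⟩
            refine ⟨⟨u, by rw [← hfr] at hu; exact List.mem_toFinset.mp hu, hnb⟩, hb, hs, ?_⟩
            rintro rfl
            exact hmnF (by rw [Fr_succ]; exact Finset.mem_filter.mpr ⟨hb, hs, u, hu, hnb⟩)
        have hd1 : d + 1 < J := by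
          rcases Nat.lt_or_ge (d + 1) J with h | h
          · exact h
          · have : J = d + 1 := by omega
            subst this; exact absurd hmJ hmnF
        have hinv' : VInv vis' (Vis a b n (d + 1)) := by
          rw [Vis_succ, ← hEF]; exact e2
        have key := ih (d + 1) E vis' hd1 hinv' (by rw [hEF]) (by omega)
        push_cast at key ⊢
        simpa using key

-- if m is at no positive level, the wave loop returns none
theorem loopW_none (a b n m : Int) (hm : ∀ j : Nat, 1 ≤ j → m ∉ Fr a b n j) :
    ∀ (fuel : Nat), ∀ (d : Nat) (frontier : List Int) (visited : Array Bool),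
    VInv visited (Vis a b n d) → frontier.toFinset = Fr a b n d →
    waveLoop a b m fuel frontier visited (d : Int) = none := by
  intro fuel
  induction fuel with
  | zero =>
    intro d frontier visited hinv hfr
    cases frontier with
    | nil => rfl
    | cons x cs => rfl
  | succ f ih =>
    intro d frontier visited hinv hfr
    cases frontier with
    | nil => rfl
    | cons x cs =>
      simp only [waveLoop]
      rcases innerW_spec a b m ((d : Int) + 1) (x :: cs) [] visited (Vis a b n d) hinv with
        ⟨e1, ⟨x', hx', hnb⟩, hbd, hns⟩ | ⟨E, vis', e1, e2, e3, e4⟩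
      · exfalso
        have hxF : x' ∈ Fr a b n d := by
          rw [← hfr]; exact List.mem_toFinset.mpr hx'
        have hmV : m ∈ Vis a b n (d + 1) := nbr_step a b n hxF hnb hbd
        have hmF : m ∈ Fr a b n (d + 1) := by
          rcases Finset.mem_union.mp ((Vis_succ a b n d) ▸ hmV) with h | h
          · exact absurd h hns
          · exact h
        exact hm (d + 1) (by omega) hmF
      · rw [e1]
        have hmnF : m ∉ Fr a b n (d + 1) := hm (d + 1) (by omega)
        have hEF : E.toFinset = Fr a b n (d + 1) := by
          ext v
          rw [List.mem_toFinset, e3 v, Fr_succ, Finset.mem_filter]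
          constructor
          · rintro ⟨⟨x'', hx'', hnb⟩, hb, hs, hmv⟩
            exact ⟨hb, hs, x'', by rw [← hfr]; exact List.mem_toFinset.mpr hx'', hnb⟩
          · rintro ⟨hb, hs, u, hu, hnb⟩
            refine ⟨⟨u, by rw [← hfr] at hu; exact List.mem_toFinset.mp hu, hnb⟩, hb, hs, ?_⟩
            rintro rfl
            exact hmnF (by rw [Fr_succ]; exact Finset.mem_filter.mpr ⟨hb, hs, u, hu, hnb⟩)
        have hinv' : VInv vis' (Vis a b n (d + 1)) := by
          rw [Vis_succ, ← hEF]; exact e2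
        have key := ih (d + 1) E vis' hinv' (by rw [hEF])
        push_cast at key ⊢
        simpa using key

theorem waveInit (n : Int) (hn0 : 0 ≤ n) (hn1 : n ≤ 100000) :
    VInv (asetBo (Array.replicate 100001 false) n true) {n} := by
  have hrepB : ∀ j : Int, agetBo (Array.replicate 100001 false) j = false := by
    intro j; unfold agetBo Array.getD; split <;> simp
  refine ⟨by simp [asetBo, Array.size_setIfInBounds], ?_, ?_⟩
  · intro i hi; rw [Finset.mem_singleton] at hi; subst hi; exact ⟨hn0, hn1⟩
  · intro i hi0 hi1
    have harr : asetBo (Array.replicate 100001 false) n true =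
        asetBo (Array.replicate 100001 false) (pyWrap n) true := by
      simp [asetBo, pyWrap_of_nonneg hn0]
    rw [harr, agetBo_asetBo _ _ _ _ (by simp) (by rw [pyWrap_of_nonneg hn0]; exact hn0)
        (by rw [pyWrap_of_nonneg hn0]; exact hn1) (by rw [pyWrap_of_nonneg hi0]; exact hi0),
      pyWrap_of_nonneg hi0, pyWrap_of_nonneg hn0, Finset.mem_singleton]
    by_cases h : i = n
    · simp [h]
    · simp [h, hrepB i]

theorem waveChar_found (a b n m : Int) (hn0 : 0 ≤ n) (hn1 : n ≤ 100000)
    (J : Nat) (hJ1 : 1 ≤ J) (hmJ : m ∈ Fr a b n J) : waveBfs a b n m = some ((J : Int)) := by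
  have hn : n ∈ boardB := mem_boardB.mpr ⟨hn0, hn1⟩
  have key := loopW_found a b n m hn J hmJ 100003 0 [n]
    (asetBo (Array.replicate 100001 false) n true) (by omega)
    (by rw [Vis_zero]; exact waveInit n hn0 hn1) (by rw [Fr_zero]; simp) (by omega)
  simpa [waveBfs] using key

theorem waveChar_none (a b n m : Int) (hn0 : 0 ≤ n) (hn1 : n ≤ 100000)
    (hm : ∀ j : Nat, 1 ≤ j → m ∉ Fr a b n j) : waveBfs a b n m = none := by
  have key := loopW_none a b n m hm 100003 0 [n]
    (asetBo (Array.replicate 100001 false) n true)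
    (by rw [Vis_zero]; exact waveInit n hn0 hn1) (by rw [Fr_zero]; simp)
  simpa [waveBfs] using key

-- A's characterization by the level sets
theorem bfs_found (a b n m : Int) (hn0 : 0 ≤ n) (hn1 : n ≤ 100000)
    (J : Nat) (hJ1 : 1 ≤ J) (hmJ : m ∈ Fr a b n J) : bfs a b n m = some ((J : Int)) := by
  rw [bfs_eq_wave a b n m hn0 hn1]
  exact waveChar_found a b n m hn0 hn1 J hJ1 hmJ

theorem bfs_none (a b n m : Int) (hn0 : 0 ≤ n) (hn1 : n ≤ 100000)
    (hm : ∀ j : Nat, 1 ≤ j → m ∉ Fr a b n j) : bfs a b n m = none := by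
  rw [bfs_eq_wave a b n m hn0 hn1]
  exact waveChar_none a b n m hn0 hn1 hm

-- =====================================================================================
-- Part 4: the relaxation fixpoint computes exactly the level of every cell.
-- =====================================================================================

theorem dgetO_dsetO (arr : Array (Option Int)) (i j : Int) (v : Option Int)
    (hsz : arr.size = 100001) (hi0 : 0 ≤ i) (hi1 : i ≤ 100000) (hj : 0 ≤ pyWrap j) :
    dgetO (dsetO arr i v) j = if pyWrap j = i then v else dgetO arr j := by
  unfold dgetO dsetO
  rw [pyWrap_of_nonneg hi0, arrGetD_set _ _ _ _ _ (by omega)]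
  by_cases h : pyWrap j = i
  · simp [h]
  · rw [if_neg (by omega), if_neg h]

theorem relaxStep_size (dxv : Int) :
    ∀ (nxs : List Int) (dist : Array (Option Int)) (ch : Bool),
    (relaxStep dxv nxs dist ch).1.size = dist.size := by
  intro nxs
  induction nxs with
  | nil => intro dist ch; rfl
  | cons nx rest ih =>
    intro dist ch
    simp only [relaxStep]
    split
    · rw [ih]; simp [dsetO, Array.size_setIfInBounds]
    · exact ih dist ch

theorem sweepCells_cons_none (a b x : Int) (rest : List Int) (dist : Array (Option Int))
    (ch : Bool) (hx : dgetO dist x = none) :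
    sweepCells a b (x :: rest) dist ch = sweepCells a b rest dist ch := by
  simp only [sweepCells, hx]

theorem sweepCells_cons_some (a b x : Int) (rest : List Int) (dist : Array (Option Int))
    (ch : Bool) (dxv : Int) (hx : dgetO dist x = some dxv) :
    sweepCells a b (x :: rest) dist ch =
      sweepCells a b rest
        (relaxStep dxv [x + 1, x - 1, x + a, x - a, x + b, x - b, a * x, b * x] dist ch).1
        (relaxStep dxv [x + 1, x - 1, x + a, x - a, x + b, x - b, a * x, b * x] dist ch).2 := by
  simp only [sweepCells, hx]

-- new-value-of-a-cell "is at most" its old value (none = +infinity)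
def odLE : Option Int → Option Int → Prop
  | _, none => True
  | none, some _ => False
  | some i, some j => i ≤ j

theorem odLE_refl (o : Option Int) : odLE o o := by cases o <;> simp [odLE]

theorem odLE_trans {o1 o2 o3 : Option Int} (h1 : odLE o1 o2) (h2 : odLE o2 o3) : odLE o1 o3 := by
  cases o1 <;> cases o2 <;> cases o3 <;> simp_all [odLE]
  omega

theorem relaxStep_mono (dxv : Int) :
    ∀ (nxs : List Int) (dist : Array (Option Int)) (ch : Bool),
    dist.size = 100001 →
    ∀ v : Int, 0 ≤ v → v ≤ 100000 →
    odLE (dgetO (relaxStep dxv nxs dist ch).1 v) (dgetO dist v) := by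
  intro nxs
  induction nxs with
  | nil => intro dist ch hsz v h0 h1; exact odLE_refl _
  | cons nx rest ih =>
    intro dist ch hsz v h0 h1
    simp only [relaxStep]
    split
    next hg =>
      obtain ⟨g0, g1, g2⟩ := hg
      refine odLE_trans (ih _ _ (by simp [dsetO, Array.size_setIfInBounds, hsz]) v h0 h1) ?_
      rw [dgetO_dsetO dist nx v _ hsz g0 g1 (by rw [pyWrap_of_nonneg h0]; exact h0),
          pyWrap_of_nonneg h0]
      by_cases hv : v = nx
      · subst hv
        rw [if_pos rfl]
        cases ho : dgetO dist v with
        | none => simp [odLE]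
        | some w =>
          rw [ho] at g2
          simp only [relaxCond, decide_eq_true_eq] at g2
          simp [odLE]
          omega
      · rw [if_neg hv]
        exact odLE_refl _
    · exact ih dist ch hsz v h0 h1

theorem sweep_mono (a b : Int) :
    ∀ (order : List Int) (dist : Array (Option Int)) (ch : Bool),
    dist.size = 100001 →
    ∀ v : Int, 0 ≤ v → v ≤ 100000 →
    odLE (dgetO (sweepCells a b order dist ch).1 v) (dgetO dist v) := by
  intro order
  induction order with
  | nil => intro dist ch hsz v h0 h1; exact odLE_refl _
  | cons x rest ih =>
    intro dist ch hsz v h0 h1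
    cases hx : dgetO dist x with
    | none => rw [sweepCells_cons_none a b x rest dist ch hx]; exact ih dist ch hsz v h0 h1
    | some dxv =>
      rw [sweepCells_cons_some a b x rest dist ch dxv hx]
      refine odLE_trans (ih _ _ (by rw [relaxStep_size]; exact hsz) v h0 h1) ?_
      exact relaxStep_mono dxv _ dist ch hsz v h0 h1

-- the relaxation invariant: sizes, soundness of every set value, and the pinned source
def RInv (a b n : Int) (dist : Array (Option Int)) : Prop :=
  dist.size = 100001 ∧
  (∀ v : Int, 0 ≤ v → v ≤ 100000 → ∀ k : Int, dgetO dist v = some k →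
     ∃ j : Nat, k = (j : Int) ∧ v ∈ Vis a b n j) ∧
  dgetO dist n = some 0

theorem relaxStep_RInv (a b n : Int) (hn0 : 0 ≤ n) (hn1 : n ≤ 100000)
    (u dxv : Int) (hu0 : 0 ≤ u) (hu1 : u ≤ 100000) (ju : Nat) (hju : dxv = (ju : Int))
    (huV : u ∈ Vis a b n ju) :
    ∀ (nxs : List Int), (∀ nx ∈ nxs, nx ∈ nbrsL a b u) →
    ∀ (dist : Array (Option Int)) (ch : Bool), RInv a b n dist →
    RInv a b n (relaxStep dxv nxs dist ch).1 := by
  intro nxs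
  induction nxs with
  | nil => intro hnb dist ch hinv; exact hinv
  | cons nx rest ih =>
    intro hnb dist ch hinv
    obtain ⟨hsz, hsound, hsrc⟩ := hinv
    simp only [relaxStep]
    split
    next hg =>
      obtain ⟨g0, g1, g2⟩ := hg
      refine ih (fun x hx => hnb x (List.mem_cons_of_mem _ hx)) _ _ ?_
      have hnxb : nx ∈ boardB := mem_boardB.mpr ⟨g0, g1⟩
      have hnxV : nx ∈ Vis a b n (ju + 1) :=
        nbr_Vis a b n huV (hnb nx List.mem_cons_self) hnxb
      have hne : nx ≠ n := by
        intro he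
        rw [he, hsrc] at g2
        simp only [relaxCond, decide_eq_true_eq] at g2
        omega
      refine ⟨by simp [dsetO, Array.size_setIfInBounds, hsz], ?_, ?_⟩
      · intro v h0 h1 k hk
        rw [dgetO_dsetO dist nx _ _ hsz g0 g1 (by rw [pyWrap_of_nonneg h0]; exact h0),
            pyWrap_of_nonneg h0] at hk
        by_cases hv : v = nx
        · rw [if_pos hv] at hk
          have hk' := Option.some.inj hk
          refine ⟨ju + 1, by push_cast; omega, by rw [hv]; exact hnxV⟩
        · rw [if_neg hv] at hk
          exact hsound v h0 h1 k hk
      · rw [dgetO_dsetO dist nx _ _ hsz g0 g1 (by rw [pyWrap_of_nonneg hn0]; exact hn0),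
            pyWrap_of_nonneg hn0, if_neg (fun h => hne h.symm)]
        exact hsrc
    · exact ih (fun x hx => hnb x (List.mem_cons_of_mem _ hx)) dist ch ⟨hsz, hsound, hsrc⟩

theorem sweep_RInv (a b n : Int) (hn0 : 0 ≤ n) (hn1 : n ≤ 100000) :
    ∀ (order : List Int), (∀ x ∈ order, 0 ≤ x ∧ x ≤ 100000) →
    ∀ (dist : Array (Option Int)) (ch : Bool), RInv a b n dist →
    RInv a b n (sweepCells a b order dist ch).1 := by
  intro order
  induction order with
  | nil => intro hord dist ch hinv; exact hinv
  | cons x rest ih =>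
    intro hord dist ch hinv
    have hxr := hord x List.mem_cons_self
    have hord' := fun y hy => hord y (List.mem_cons_of_mem _ hy)
    cases hx : dgetO dist x with
    | none => rw [sweepCells_cons_none a b x rest dist ch hx]; exact ih hord' dist ch hinv
    | some dxv =>
      rw [sweepCells_cons_some a b x rest dist ch dxv hx]
      apply ih hord'
      obtain ⟨j, hj, hV⟩ := hinv.2.1 x hxr.1 hxr.2 dxv hx
      exact relaxStep_RInv a b n hn0 hn1 x dxv hxr.1 hxr.2 j hj hV
        [x + 1, x - 1, x + a, x - a, x + b, x - b, a * x, b * x]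
        (fun nx hnx => hnx) dist ch hinv

-- processing u relaxes each of its in-board neighbours down to at most (value of u) + 1
theorem relaxStep_effect (dxv : Int) :
    ∀ (nxs : List Int) (dist : Array (Option Int)) (ch : Bool),
    dist.size = 100001 →
    ∀ v ∈ nxs, 0 ≤ v → v ≤ 100000 →
    ∃ h : Int, h ≤ dxv + 1 ∧ dgetO (relaxStep dxv nxs dist ch).1 v = some h := by
  intro nxs
  induction nxs with
  | nil => intro dist ch hsz v hv; exact absurd hv (List.not_mem_nil)
  | cons nx rest ih =>
    intro dist ch hsz v hv h0 h1
    simp only [relaxStep]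
    by_cases hveq : v = nx
    · subst hveq
      split
      next hg =>
        obtain ⟨g0, g1, g2⟩ := hg
        -- v was just set to dxv + 1; the rest of the pass can only lower it, keeping some
        have hset : dgetO (dsetO dist v (some (dxv + 1))) v = some (dxv + 1) := by
          rw [dgetO_dsetO dist v v _ hsz g0 g1 (by rw [pyWrap_of_nonneg h0]; exact h0),
              pyWrap_of_nonneg h0, if_pos rfl]
        have hmono := relaxStep_mono dxv rest (dsetO dist v (some (dxv + 1))) true
          (by simp [dsetO, Array.size_setIfInBounds, hsz]) v h0 h1
        rw [hset] at hmono
        cases hres : dgetO (relaxStep dxv rest (dsetO dist v (some (dxv + 1))) true).1 v with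
        | none => rw [hres] at hmono; exact absurd hmono (by simp [odLE])
        | some w =>
          rw [hres] at hmono
          exact ⟨w, by simpa [odLE] using hmono, rfl⟩
      next hg =>
        -- the guard failed although v is in range: the old value is already ≤ dxv + 1
        have hcond : relaxCond (dgetO dist v) dxv = false := by
          cases hc : relaxCond (dgetO dist v) dxv
          · rfl
          · exact absurd ⟨h0, h1, hc⟩ hg
        cases ho : dgetO dist v with
        | none => rw [ho] at hcond; simp [relaxCond] at hcond
        | some w =>
          rw [ho] at hcond
          simp only [relaxCond, decide_eq_false_iff_not, not_lt] at hcond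
          have hmono := relaxStep_mono dxv rest dist ch hsz v h0 h1
          rw [ho] at hmono
          cases hres : dgetO (relaxStep dxv rest dist ch).1 v with
          | none => rw [hres] at hmono; exact absurd hmono (by simp [odLE])
          | some w' =>
            rw [hres] at hmono
            exact ⟨w', by simp [odLE] at hmono; omega, rfl⟩
    · have hv' : v ∈ rest := by
        rcases List.mem_cons.mp hv with h | h
        · exact absurd h hveq
        · exact h
      split
      next hg =>
        exact ih _ true (by simp [dsetO, Array.size_setIfInBounds, hsz]) v hv' h0 h1
      · exact ih dist ch hsz v hv' h0 h1

theorem sweep_effect (a b : Int) :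
    ∀ (order : List Int) (dist : Array (Option Int)) (ch : Bool),
    dist.size = 100001 →
    ∀ u ∈ order, 0 ≤ u → u ≤ 100000 →
    ∀ du : Int, dgetO dist u = some du →
    ∀ v ∈ nbrsL a b u, 0 ≤ v → v ≤ 100000 →
    ∃ h : Int, h ≤ du + 1 ∧ dgetO (sweepCells a b order dist ch).1 v = some h := by
  intro order
  induction order with
  | nil => intro dist ch hsz u hu; exact absurd hu (List.not_mem_nil)
  | cons x rest ih =>
    intro dist ch hsz u hu hu0 hu1 du hdu v hvnb hv0 hv1
    by_cases hxu : x = u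
    · subst hxu
      rw [sweepCells_cons_some a b x rest dist ch du hdu]
      have hsz1 : (relaxStep du [x + 1, x - 1, x + a, x - a, x + b, x - b, a * x, b * x]
          dist ch).1.size = 100001 := by rw [relaxStep_size]; exact hsz
      -- relaxStep on x's neighbours puts v at some h ≤ du + 1; the rest only lowers it
      obtain ⟨h, hle, hval⟩ := relaxStep_effect du
        [x + 1, x - 1, x + a, x - a, x + b, x - b, a * x, b * x] dist ch hsz v hvnb hv0 hv1
      have hmono := sweep_mono a b rest
        (relaxStep du [x + 1, x - 1, x + a, x - a, x + b, x - b, a * x, b * x] dist ch).1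
        (relaxStep du [x + 1, x - 1, x + a, x - a, x + b, x - b, a * x, b * x] dist ch).2
        hsz1 v hv0 hv1
      rw [hval] at hmono
      cases hres : dgetO (sweepCells a b rest
          (relaxStep du [x + 1, x - 1, x + a, x - a, x + b, x - b, a * x, b * x] dist ch).1
          (relaxStep du [x + 1, x - 1, x + a, x - a, x + b, x - b, a * x, b * x] dist ch).2).1
          v with
      | none => rw [hres] at hmono; exact absurd hmono (by simp [odLE])
      | some w =>
        rw [hres] at hmono
        exact ⟨w, by simp [odLE] at hmono; omega, rfl⟩
    · have hu' : u ∈ rest := by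
        rcases List.mem_cons.mp hu with h | h
        · exact absurd h.symm hxu
        · exact h
      cases hx : dgetO dist x with
      | none =>
        rw [sweepCells_cons_none a b x rest dist ch hx]
        exact ih dist ch hsz u hu' hu0 hu1 du hdu v hvnb hv0 hv1
      | some dxv =>
        rw [sweepCells_cons_some a b x rest dist ch dxv hx]
        have hsz1 : (relaxStep dxv [x + 1, x - 1, x + a, x - a, x + b, x - b, a * x, b * x]
            dist ch).1.size = 100001 := by rw [relaxStep_size]; exact hsz
        have hmono := relaxStep_mono dxv [x + 1, x - 1, x + a, x - a, x + b, x - b, a * x, b * x]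
          dist ch hsz u hu0 hu1
        rw [hdu] at hmono
        cases hdu' : dgetO (relaxStep dxv
            [x + 1, x - 1, x + a, x - a, x + b, x - b, a * x, b * x] dist ch).1 u with
        | none => rw [hdu'] at hmono; exact absurd hmono (by simp [odLE])
        | some du' =>
          rw [hdu'] at hmono
          obtain ⟨h, hle, hval⟩ := ih
            (relaxStep dxv [x + 1, x - 1, x + a, x - a, x + b, x - b, a * x, b * x] dist ch).1
            (relaxStep dxv [x + 1, x - 1, x + a, x - a, x + b, x - b, a * x, b * x] dist ch).2
            hsz1 u hu' hu0 hu1 du' hdu' v hvnb hv0 hv1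
          exact ⟨h, by simp [odLE] at hmono; omega, hval⟩

-- the changed flag never drops back to false
theorem relaxStep_flag (dxv : Int) :
    ∀ (nxs : List Int) (dist : Array (Option Int)), (relaxStep dxv nxs dist true).2 = true := by
  intro nxs
  induction nxs with
  | nil => intro dist; rfl
  | cons nx rest ih =>
    intro dist
    simp only [relaxStep]
    split
    · exact ih _
    · exact ih dist

theorem sweep_flag (a b : Int) :
    ∀ (order : List Int) (dist : Array (Option Int)), (sweepCells a b order dist true).2 = true := by
  intro order
  induction order with
  | nil => intro dist; rfl
  | cons x rest ih =>
    intro dist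
    cases hx : dgetO dist x with
    | none => rw [sweepCells_cons_none a b x rest dist true hx]; exact ih dist
    | some dxv =>
      rw [sweepCells_cons_some a b x rest dist true dxv hx]
      have hfl := relaxStep_flag dxv [x + 1, x - 1, x + a, x - a, x + b, x - b, a * x, b * x] dist
      rw [hfl]
      exact ih _

-- a pass that reports no change indeed changed nothing, and fired no guard
theorem relaxStep_nochange (dxv : Int) :
    ∀ (nxs : List Int) (dist : Array (Option Int)) (ch : Bool),
    (relaxStep dxv nxs dist ch).2 = false →
    (relaxStep dxv nxs dist ch).1 = dist ∧
    (∀ nx ∈ nxs, ¬(0 ≤ nx ∧ nx ≤ 100000 ∧ relaxCond (dgetO dist nx) dxv = true)) := by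
  intro nxs
  induction nxs with
  | nil => intro dist ch h; exact ⟨rfl, by simp⟩
  | cons nx rest ih =>
    intro dist ch h
    simp only [relaxStep] at h ⊢
    by_cases hg : 0 ≤ nx ∧ nx ≤ 100000 ∧ relaxCond (dgetO dist nx) dxv = true
    · rw [if_pos hg, relaxStep_flag] at h
      exact absurd h (by decide)
    · rw [if_neg hg] at h ⊢
      obtain ⟨h1, h2⟩ := ih dist ch h
      refine ⟨h1, ?_⟩
      intro y hy
      rcases List.mem_cons.mp hy with rfl | hy
      · exact hg
      · exact h2 y hy

theorem sweep_nochange (a b : Int) :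
    ∀ (order : List Int) (dist : Array (Option Int)) (ch : Bool),
    (sweepCells a b order dist ch).2 = false →
    (sweepCells a b order dist ch).1 = dist ∧
    (∀ x ∈ order, ∀ dxv : Int, dgetO dist x = some dxv →
      ∀ nx ∈ nbrsL a b x, ¬(0 ≤ nx ∧ nx ≤ 100000 ∧ relaxCond (dgetO dist nx) dxv = true)) := by
  intro order
  induction order with
  | nil => intro dist ch h; exact ⟨rfl, by simp⟩
  | cons x rest ih =>
    intro dist ch h
    cases hx : dgetO dist x with
    | none =>
      rw [sweepCells_cons_none a b x rest dist ch hx] at h ⊢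
      obtain ⟨h1, h2⟩ := ih dist ch h
      refine ⟨h1, ?_⟩
      intro y hy dxv hdxv
      rcases List.mem_cons.mp hy with rfl | hy
      · rw [hx] at hdxv; exact absurd hdxv (by simp)
      · exact h2 y hy dxv hdxv
    | some dxv =>
      rw [sweepCells_cons_some a b x rest dist ch dxv hx] at h ⊢
      -- the inner pass's flag must itself be false, else it would stick
      have hflag : (relaxStep dxv [x + 1, x - 1, x + a, x - a, x + b, x - b, a * x, b * x]
          dist ch).2 = false := by
        cases hc : (relaxStep dxv [x + 1, x - 1, x + a, x - a, x + b, x - b, a * x, b * x]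
            dist ch).2
        · rfl
        · exfalso
          rw [hc, sweep_flag] at h
          exact absurd h (by decide)
      obtain ⟨hr1, hr2⟩ := relaxStep_nochange dxv _ dist ch hflag
      rw [hr1] at h ⊢
      obtain ⟨h1, h2⟩ := ih dist _ h
      refine ⟨h1, ?_⟩
      intro y hy dyv hdyv
      rcases List.mem_cons.mp hy with rfl | hy
      · rw [hx] at hdyv
        have he : dxv = dyv := by injection hdyv
        subst he
        exact hr2
      · exact h2 y hy dyv hdyv

-- at level k and below, every cell already carries a value no larger than its level
def GoodUpTo (a b n : Int) (dist : Array (Option Int)) (k : Nat) : Prop :=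
  ∀ j : Nat, j ≤ k → ∀ v ∈ Fr a b n j, ∃ h : Int, h ≤ (j : Int) ∧ dgetO dist v = some h

def GoodAll (a b n : Int) (dist : Array (Option Int)) : Prop :=
  ∀ j : Nat, ∀ v ∈ Fr a b n j, ∃ h : Int, h ≤ (j : Int) ∧ dgetO dist v = some h

-- with the soundness invariant, a value bounded by the cell's level is exactly the level
theorem exact_val (a b n : Int) (hn : n ∈ boardB) {dist : Array (Option Int)}
    (hinv : RInv a b n dist) {j : Nat} {v : Int} (hv : v ∈ Fr a b n j)
    {h : Int} (hh : h ≤ (j : Int)) (hval : dgetO dist v = some h) : h = (j : Int) := by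
  have hvb : v ∈ boardB := Fr_subset_board a b n hn j hv
  obtain ⟨hv0, hv1⟩ := mem_boardB.mp hvb
  obtain ⟨j', hj', hV⟩ := hinv.2.1 v hv0 hv1 h hval
  obtain ⟨j'', hj'', hF⟩ := (mem_Vis_iff a b n j' v).mp hV
  have := level_unique a b n hF hv
  omega

theorem sweep_progress (a b n : Int) (hn : n ∈ boardB) (order : List Int)
    (hcov : ∀ u : Int, 0 ≤ u → u ≤ 100000 → u ∈ order)
    (dist : Array (Option Int)) (ch : Bool) (hinv : RInv a b n dist) (k : Nat)
    (hgood : GoodUpTo a b n dist k) :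
    GoodUpTo a b n (sweepCells a b order dist ch).1 (k + 1) := by
  intro j hj v hv
  rcases Nat.lt_or_ge j (k + 1) with hlt | hge
  · -- an already-good level only improves
    obtain ⟨h, hle, hval⟩ := hgood j (by omega) v hv
    have hvb := mem_boardB.mp (Fr_subset_board a b n hn j hv)
    have hmono := sweep_mono a b order dist ch hinv.1 v hvb.1 hvb.2
    rw [hval] at hmono
    cases hres : dgetO (sweepCells a b order dist ch).1 v with
    | none => rw [hres] at hmono; exact absurd hmono (by simp [odLE])
    | some w =>
      rw [hres] at hmono
      exact ⟨w, by simp [odLE] at hmono; omega, rfl⟩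
  · have hjk : j = k + 1 := by omega
    subst hjk
    -- v enters at level k+1 from some u at level k, which the pass relaxes
    have hvF := hv
    rw [Fr_succ] at hvF
    obtain ⟨hvb, hnv, u, hu, hnb⟩ := Finset.mem_filter.mp hvF
    have hub := mem_boardB.mp (Fr_subset_board a b n hn k hu)
    obtain ⟨h, hle, hval⟩ := hgood k le_rfl u hu
    have hexact : h = (k : Int) := exact_val a b n hn hinv hu hle hval
    obtain ⟨hv0, hv1⟩ := mem_boardB.mp hvb
    obtain ⟨h', hle', hval'⟩ := sweep_effect a b order dist ch hinv.1 u
      (hcov u hub.1 hub.2) hub.1 hub.2 h hval v hnb hv0 hv1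
    exact ⟨h', by push_cast; omega, hval'⟩

-- a fired-nothing state is complete: every level is exactly valued
theorem nochange_good (a b n : Int) (hn : n ∈ boardB) (dist : Array (Option Int))
    (hinv : RInv a b n dist)
    (hnf : ∀ x : Int, 0 ≤ x → x ≤ 100000 → ∀ dxv : Int, dgetO dist x = some dxv →
      ∀ nx ∈ nbrsL a b x, ¬(0 ≤ nx ∧ nx ≤ 100000 ∧ relaxCond (dgetO dist nx) dxv = true)) :
    GoodAll a b n dist := by
  intro j
  induction j with
  | zero =>
    intro v hv
    rw [Fr_zero, Finset.mem_singleton] at hv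
    subst hv
    exact ⟨0, by omega, hinv.2.2⟩
  | succ k ih =>
    intro v hv
    have hvF := hv
    rw [Fr_succ] at hvF
    obtain ⟨hvb, hnv, u, hu, hnb⟩ := Finset.mem_filter.mp hvF
    have hub := mem_boardB.mp (Fr_subset_board a b n hn k hu)
    obtain ⟨h, hle, hval⟩ := ih u hu
    have hexact : h = (k : Int) := exact_val a b n hn hinv hu hle hval
    obtain ⟨hv0, hv1⟩ := mem_boardB.mp hvb
    have hng := hnf u hub.1 hub.2 h hval v hnb
    cases hov : dgetO dist v with
    | none =>
      exfalso
      exact hng ⟨hv0, hv1, by rw [hov]; rfl⟩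
    | some w =>
      refine ⟨w, ?_, rfl⟩
      have : ¬(h + 1 < w) := by
        intro hlt
        exact hng ⟨hv0, hv1, by rw [hov]; simp [relaxCond]; omega⟩
      push_cast
      omega

theorem relaxLoop_good (a b n : Int) (hn0 : 0 ≤ n) (hn1 : n ≤ 100000) :
    ∀ (fuel : Nat) (dist : Array (Option Int)) (fwd : Bool) (k : Nat),
    RInv a b n dist → GoodUpTo a b n dist k → 100002 ≤ fuel + k →
    RInv a b n (relaxLoop a b fuel dist fwd) ∧ GoodAll a b n (relaxLoop a b fuel dist fwd) := by
  have hn : n ∈ boardB := mem_boardB.mpr ⟨hn0, hn1⟩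
  have hgoodall : ∀ dist k, 100001 ≤ k → GoodUpTo a b n dist k → GoodAll a b n dist := by
    intro dist k hk hgood j v hv
    have hne : Fr a b n j ≠ ∅ := fun he => by rw [he] at hv; exact Finset.notMem_empty v hv
    have hj := level_bound a b n hn j hne
    exact hgood j (by omega) v hv
  intro fuel
  induction fuel with
  | zero =>
    intro dist fwd k hinv hgood hfuel
    exact ⟨hinv, hgoodall dist k (by omega) hgood⟩
  | succ f ih =>
    intro dist fwd k hinv hgood hfuel
    have hcov : ∀ u : Int, 0 ≤ u → u ≤ 100000 →
        u ∈ (if fwd then PySem.List.pyRange 0 100001 1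
             else PySem.List.pyRange 100000 (-1) (-1)) := by
      intro u h0 h1
      cases fwd
      · simp only [Bool.false_eq_true, reduceIte]
        rw [PySem.List.mem_pyRange_neg_one]
        omega
      · simp only [reduceIte]
        rw [PySem.List.mem_pyRange_one]
        omega
    have hord : ∀ x ∈ (if fwd then PySem.List.pyRange 0 100001 1
        else PySem.List.pyRange 100000 (-1) (-1)), 0 ≤ x ∧ x ≤ 100000 := by
      intro x hx
      cases fwd
      · simp only [Bool.false_eq_true, reduceIte] at hx
        rw [PySem.List.mem_pyRange_neg_one] at hx
        omega
      · simp only [reduceIte] at hx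
        rw [PySem.List.mem_pyRange_one] at hx
        omega
    simp only [relaxLoop]
    cases hc : (sweepCells a b (if fwd then PySem.List.pyRange 0 100001 1
        else PySem.List.pyRange 100000 (-1) (-1)) dist false).2
    · -- stable pass: the state is complete and is returned
      obtain ⟨hsame, hnf⟩ := sweep_nochange a b _ dist false hc
      simp only [Bool.false_eq_true, reduceIte]
      rw [hsame]
      refine ⟨hinv, nochange_good a b n hn dist hinv ?_⟩
      intro x hx0 hx1 dxv hdxv nx hnx
      exact hnf x (hcov x hx0 hx1) dxv hdxv nx hnx
    · -- something changed: one more level is now good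
      simp only [reduceIte]
      exact ih _ (!fwd) (k + 1)
        (sweep_RInv a b n hn0 hn1 _ hord dist false hinv)
        (sweep_progress a b n hn _ hcov dist false hinv k hgood)
        (by omega)

-- =====================================================================================
-- Part 5: characterization of bfs_alt, and the verdicts.
-- =====================================================================================

theorem dgetO_replicate (j : Int) :
    dgetO (Array.replicate 100001 (none : Option Int)) j = none := by
  unfold dgetO Array.getD
  split <;> simp

theorem init_RInv (a b n : Int) (hn0 : 0 ≤ n) (hn1 : n ≤ 100000) :
    RInv a b n (dsetO (Array.replicate 100001 none) n (some 0)) := by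
  have hget : ∀ j : Int, 0 ≤ j →
      dgetO (dsetO (Array.replicate 100001 none) n (some 0)) j =
        if j = n then some 0 else none := by
    intro j hj
    rw [dgetO_dsetO _ _ _ _ (by simp) hn0 hn1 (by rw [pyWrap_of_nonneg hj]; exact hj),
        pyWrap_of_nonneg hj]
    by_cases h : j = n
    · simp [h]
    · simp [h, dgetO_replicate j]
  refine ⟨by simp [dsetO, Array.size_setIfInBounds], ?_, ?_⟩
  · intro v h0 h1 k hk
    rw [hget v h0] at hk
    by_cases hv : v = n
    · rw [if_pos hv] at hk
      have hk' := Option.some.inj hk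
      exact ⟨0, by omega, by rw [hv, Vis_zero]; exact Finset.mem_singleton_self n⟩
    · rw [if_neg hv] at hk
      exact absurd hk (by simp)
  · rw [hget n hn0, if_pos rfl]

theorem init_Good (a b n : Int) (hn0 : 0 ≤ n) (hn1 : n ≤ 100000) :
    GoodUpTo a b n (dsetO (Array.replicate 100001 none) n (some 0)) 0 := by
  intro j hj v hv
  have hj0 : j = 0 := by omega
  subst hj0
  rw [Fr_zero, Finset.mem_singleton] at hv
  subst hv
  refine ⟨0, by omega, ?_⟩
  rw [dgetO_dsetO _ _ _ _ (by simp) hn0 hn1 (by rw [pyWrap_of_nonneg hn0]; exact hn0),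
      pyWrap_of_nonneg hn0, if_pos rfl]

theorem alt_found (a b n m : Int) (hn0 : 0 ≤ n) (hn1 : n ≤ 100000)
    (J : Nat) (hmJ : m ∈ Fr a b n J) : bfs_alt a b n m = some ((J : Int)) := by
  have hn : n ∈ boardB := mem_boardB.mpr ⟨hn0, hn1⟩
  have hm : m ∈ boardB := Fr_subset_board a b n hn J hmJ
  obtain ⟨hrinv, hgood⟩ := relaxLoop_good a b n hn0 hn1 100003
    (dsetO (Array.replicate 100001 none) n (some 0)) true 0
    (init_RInv a b n hn0 hn1) (init_Good a b n hn0 hn1) (by omega)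
  obtain ⟨h, hle, hval⟩ := hgood J m hmJ
  have hexact : h = (J : Int) := exact_val a b n hn hrinv hmJ hle hval
  unfold bfs_alt
  rw [if_pos (mem_boardB.mp hm), hval, hexact]

theorem alt_none (a b n m : Int) (hn0 : 0 ≤ n) (hn1 : n ≤ 100000)
    (hm : ∀ j : Nat, m ∉ Fr a b n j) : bfs_alt a b n m = none := by
  by_cases hmb : 0 ≤ m ∧ m ≤ 100000
  · obtain ⟨hrinv, hgood⟩ := relaxLoop_good a b n hn0 hn1 100003
      (dsetO (Array.replicate 100001 none) n (some 0)) true 0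
      (init_RInv a b n hn0 hn1) (init_Good a b n hn0 hn1) (by omega)
    unfold bfs_alt
    rw [if_pos hmb]
    cases hval : dgetO (relaxLoop a b 100003
        (dsetO (Array.replicate 100001 none) n (some 0)) true) m with
    | none => rfl
    | some k =>
      exfalso
      obtain ⟨j, hj, hV⟩ := hrinv.2.1 m hmb.1 hmb.2 k hval
      obtain ⟨j', hj', hF⟩ := (mem_Vis_iff a b n j m).mp hV
      exact hm j' hF
  · unfold bfs_alt
    rw [if_neg hmb]

-- when m = n, A never rediscovers its pre-marked start cell and returns none …
theorem bfs_at_diag (a b n : Int) (hn0 : 0 ≤ n) (hn1 : n ≤ 100000) :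
    bfs a b n n = none := by
  apply bfs_none a b n n hn0 hn1
  intro j hj hmem
  have h0 : n ∈ Fr a b n 0 := by rw [Fr_zero]; exact Finset.mem_singleton_self n
  have := level_unique a b n hmem h0
  omega

-- … while B's table pins the start at distance 0
theorem alt_at_diag (a b n : Int) (hn0 : 0 ≤ n) (hn1 : n ≤ 100000) :
    bfs_alt a b n n = some 0 := by
  have := alt_found a b n n hn0 hn1 0 (by rw [Fr_zero]; exact Finset.mem_singleton_self n)
  simpa using this

theorem bfs_spec : Claim_unchanged_bfs := by
  intro a b n m hdom hpre hnd
  obtain ⟨hn0, hn1⟩ := hpre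
  have hmn : m ≠ n := hnd
  by_cases hex : ∃ J : Nat, m ∈ Fr a b n J
  · obtain ⟨J, hmJ⟩ := hex
    have hJ1 : 1 ≤ J := by
      rcases Nat.eq_zero_or_pos J with rfl | h
      · rw [Fr_zero, Finset.mem_singleton] at hmJ
        exact absurd hmJ hmn
      · exact h
    rw [bfs_found a b n m hn0 hn1 J hJ1 hmJ, alt_found a b n m hn0 hn1 J hmJ]
  · have hex' : ∀ j : Nat, m ∉ Fr a b n j := fun j hj => hex ⟨j, hj⟩
    rw [bfs_none a b n m hn0 hn1 (fun j _ => hex' j), alt_none a b n m hn0 hn1 hex']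

theorem bfs_tight : Claim_exact_bfs := by
  intro a b n m hdom hpre hd
  obtain ⟨hn0, hn1⟩ := hpre
  rw [hd, bfs_at_diag a b n hn0 hn1, alt_at_diag a b n hn0 hn1]
  simp

theorem bfs_changed : Claim_changed_bfs := by
  unfold Claim_changed_bfs
  refine ⟨by decide, by decide, by decide, ?_, ?_, by decide⟩
  · exact bfs_at_diag 2 3 1 (by norm_num) (by norm_num)
  · exact alt_at_diag 2 3 1 (by norm_num) (by norm_num)
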